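-- pv_equiv track=rewrite | github.com/86HenriqueSilva/Loteria_Analyzer | 402.analise_repeticao_de_grupo_dezena_erro.py | obter_grupo_dezena
-- ===== SOURCE A (Python) =====
-- def obter_grupo_dezena(dezena):
--     tabela_grupos = {
--         "01": {"grupo": "AVESTRUZ", "dezenas": ["01", "02", "03", "04"]},
--         "02": {"grupo": "ÁGUIA", "dezenas": ["05", "06", "07", "08"]},
--         "03": {"grupo": "BURRO", "dezenas": ["09", "10", "11", "12"]},
--         "04": {"grupo": "BORBOLETA", "dezenas": ["13", "14", "15", "16"]},
--         "05": {"grupo": "CACHORRO", "dezenas": ["17", "18", "19", "20"]},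
--         "06": {"grupo": "CABRA", "dezenas": ["21", "22", "23", "24"]},
--         "07": {"grupo": "CARNEIRO", "dezenas": ["25", "26", "27", "28"]},
--         "08": {"grupo": "CAMELO", "dezenas": ["29", "30", "31", "32"]},
--         "09": {"grupo": "COBRA", "dezenas": ["33", "34", "35", "36"]},
--         "10": {"grupo": "COELHO", "dezenas": ["37", "38", "39", "40"]},
--         "11": {"grupo": "CAVALO", "dezenas": ["41", "42", "43", "44"]},
--         "12": {"grupo": "ELEFANTE", "dezenas": ["45", "46", "47", "48"]},
--         "13": {"grupo": "GALO", "dezenas": ["49", "50", "51", "52"]},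
--         "14": {"grupo": "GATO", "dezenas": ["53", "54", "55", "56"]},
--         "15": {"grupo": "JACARÉ", "dezenas": ["57", "58", "59", "60"]},
--         "16": {"grupo": "LEÃO", "dezenas": ["61", "62", "63", "64"]},
--         "17": {"grupo": "MACACO", "dezenas": ["65", "66", "67", "68"]},
--         "18": {"grupo": "PORCO", "dezenas": ["69", "70", "71", "72"]},
--         "19": {"grupo": "PAVÃO", "dezenas": ["73", "74", "75", "76"]},
--         "20": {"grupo": "PERU", "dezenas": ["77", "78", "79", "80"]},
--         "21": {"grupo": "TOURO", "dezenas": ["81", "82", "83", "84"]},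
--         "22": {"grupo": "TIGRE", "dezenas": ["85", "86", "87", "88"]},
--         "23": {"grupo": "URSO", "dezenas": ["89", "90", "91", "92"]},
--         "24": {"grupo": "VEADO", "dezenas": ["93", "94", "95", "96"]},
--         "25": {"grupo": "VACA", "dezenas": ["97", "98", "99", "00"]}
--     }
--     for grupo, info in tabela_grupos.items():
--         if dezena in info["dezenas"]:
--             return grupo, info["grupo"]
--     return "Desconhecido", "Desconhecido"
-- ===== SOURCE B (Python) =====
-- ANIMALS = ["AVESTRUZ", "ÁGUIA", "BURRO", "BORBOLETA", "CACHORRO", "CABRA",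
--            "CARNEIRO", "CAMELO", "COBRA", "COELHO", "CAVALO", "ELEFANTE",
--            "GALO", "GATO", "JACARÉ", "LEÃO", "MACACO", "PORCO", "PAVÃO",
--            "PERU", "TOURO", "TIGRE", "URSO", "VEADO", "VACA"]
--
--
-- def obter_grupo_dezena(dezena):
--     if len(dezena) == 2 and all('0' <= c <= '9' for c in dezena):
--         n = (ord(dezena[0]) - 48) * 10 + (ord(dezena[1]) - 48)
--         grupo = 25 if n == 0 else (n - 1) // 4 + 1
--         return "%02d" % grupo, ANIMALS[grupo - 1]
--     return "Desconhecido", "Desconhecido"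
-- ===== Notes on version B (the rewrite author's own statement) =====
-- stated objective: simpler
-- what changed: Replaces the linear scan of the hard-coded 25-group table by a guard for a two-digit string plus a closed-form computation of the group index ((n-1)//4+1, with '00' mapping to group 25) and an indexed lookup of the animal name.
import Mathlib
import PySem

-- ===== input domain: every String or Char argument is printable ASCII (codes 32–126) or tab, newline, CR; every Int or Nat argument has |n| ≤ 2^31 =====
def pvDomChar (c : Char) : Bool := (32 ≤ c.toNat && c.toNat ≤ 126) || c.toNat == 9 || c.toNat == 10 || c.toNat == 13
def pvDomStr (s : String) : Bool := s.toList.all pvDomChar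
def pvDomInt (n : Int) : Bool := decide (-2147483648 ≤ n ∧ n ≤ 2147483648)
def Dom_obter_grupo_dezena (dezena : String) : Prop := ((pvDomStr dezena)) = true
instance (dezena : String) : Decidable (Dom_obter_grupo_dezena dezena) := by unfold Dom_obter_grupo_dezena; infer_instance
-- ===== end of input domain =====

-- B replaces A's linear scan of the 25-group table by a closed-form computation of the
-- group index from the two digit characters (objective: simpler).

-- ===== PORT A =====
-- A's dict of 25 entries, in insertion order: (group key, (animal name, dezenas)).
def pvTabela : List (String × String × List String) :=
  [("01", "AVESTRUZ", ["01", "02", "03", "04"]),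
   ("02", "ÁGUIA", ["05", "06", "07", "08"]),
   ("03", "BURRO", ["09", "10", "11", "12"]),
   ("04", "BORBOLETA", ["13", "14", "15", "16"]),
   ("05", "CACHORRO", ["17", "18", "19", "20"]),
   ("06", "CABRA", ["21", "22", "23", "24"]),
   ("07", "CARNEIRO", ["25", "26", "27", "28"]),
   ("08", "CAMELO", ["29", "30", "31", "32"]),
   ("09", "COBRA", ["33", "34", "35", "36"]),
   ("10", "COELHO", ["37", "38", "39", "40"]),
   ("11", "CAVALO", ["41", "42", "43", "44"]),
   ("12", "ELEFANTE", ["45", "46", "47", "48"]),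
   ("13", "GALO", ["49", "50", "51", "52"]),
   ("14", "GATO", ["53", "54", "55", "56"]),
   ("15", "JACARÉ", ["57", "58", "59", "60"]),
   ("16", "LEÃO", ["61", "62", "63", "64"]),
   ("17", "MACACO", ["65", "66", "67", "68"]),
   ("18", "PORCO", ["69", "70", "71", "72"]),
   ("19", "PAVÃO", ["73", "74", "75", "76"]),
   ("20", "PERU", ["77", "78", "79", "80"]),
   ("21", "TOURO", ["81", "82", "83", "84"]),
   ("22", "TIGRE", ["85", "86", "87", "88"]),
   ("23", "URSO", ["89", "90", "91", "92"]),
   ("24", "VEADO", ["93", "94", "95", "96"]),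
   ("25", "VACA", ["97", "98", "99", "00"])]

-- the for-loop over tabela_grupos.items(): first entry whose dezenas contain dezena
def pvScanA (t : List (String × String × List String)) (dezena : String) : String × String :=
  match t with
  | [] => ("Desconhecido", "Desconhecido")
  | (grupo, nome, dzs) :: rest =>
      if dezena ∈ dzs then (grupo, nome) else pvScanA rest dezena

def obter_grupo_dezena (dezena : String) : String × String :=
  pvScanA pvTabela dezena

-- ===== PORT B =====
def pvAnimals : List String :=
  ["AVESTRUZ", "ÁGUIA", "BURRO", "BORBOLETA", "CACHORRO", "CABRA",
   "CARNEIRO", "CAMELO", "COBRA", "COELHO", "CAVALO", "ELEFANTE",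
   "GALO", "GATO", "JACARÉ", "LEÃO", "MACACO", "PORCO", "PAVÃO",
   "PERU", "TOURO", "TIGRE", "URSO", "VEADO", "VACA"]

def obter_grupo_dezena_alt (dezena : String) : String × String :=
  match dezena.toList with
  | [c1, c2] =>
      if ('0' ≤ c1 ∧ c1 ≤ '9') ∧ ('0' ≤ c2 ∧ c2 ≤ '9') then
        let n := (c1.toNat - 48) * 10 + (c2.toNat - 48)
        let grupo := if n = 0 then 25 else (n - 1) / 4 + 1
        -- "%02d" % grupo for 1 ≤ grupo ≤ 25: the two decimal digits
        (String.ofList [Char.ofNat (48 + grupo / 10), Char.ofNat (48 + grupo % 10)],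
         pvAnimals.getD (grupo - 1) "")
      else ("Desconhecido", "Desconhecido")
  | _ => ("Desconhecido", "Desconhecido")

-- ===== PRECONDITION & SPEC =====
def Spec_obter_grupo_dezena (dezena : String) (out : String × String) : Prop := out = obter_grupo_dezena_alt dezena
instance (dezena : String) (out : String × String) : Decidable (Spec_obter_grupo_dezena dezena out) := by unfold Spec_obter_grupo_dezena; infer_instance

-- ===== CLAIM (what is proved, stated in full; the proofs are below) =====
def Claim_equal_obter_grupo_dezena : Prop := ∀ (dezena : String), Dom_obter_grupo_dezena dezena → Spec_obter_grupo_dezena dezena (obter_grupo_dezena dezena)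

-- ===== LEMMAS AND PROOFS =====

-- a dezena-string shape test: exactly two decimal-digit characters
def pvTwoDigits (l : List Char) : Bool :=
  match l with
  | [c1, c2] => ('0' ≤ c1 && c1 ≤ '9') && ('0' ≤ c2 && c2 ≤ '9')
  | _ => false

lemma pvTabela_strings_twoDigits :
    ∀ e ∈ pvTabela, ∀ s ∈ e.2.2, pvTwoDigits s.toList = true := by decide

lemma pvScanA_not_twoDigits (t : List (String × String × List String)) (d : String)
    (ht : ∀ e ∈ t, ∀ s ∈ e.2.2, pvTwoDigits s.toList = true)
    (hd : pvTwoDigits d.toList = false) :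
    pvScanA t d = ("Desconhecido", "Desconhecido") := by
  induction t with
  | nil => rfl
  | cons e rest ih =>
      obtain ⟨g, nome, dzs⟩ := e
      have hmem : d ∉ dzs := by
        intro hm
        have := ht (g, nome, dzs) (by simp) d hm
        rw [hd] at this; exact Bool.false_ne_true this
      simp only [pvScanA, if_neg hmem]
      exact ih (fun e he => ht e (List.mem_cons_of_mem _ he))

lemma pvDigit_mem (c : Char) (h1 : '0' ≤ c) (h2 : c ≤ '9') :
    c ∈ ['0', '1', '2', '3', '4', '5', '6', '7', '8', '9'] := by
  have hv1 : 48 ≤ c.val.toNat := h1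
  have hv2 : c.val.toNat ≤ 57 := h2
  have hc : ∀ d : Char, c.val.toNat = d.val.toNat → c = d :=
    fun d hd => Char.ext (UInt32.toNat_inj.mp hd)
  have h10 : c.val.toNat = 48 ∨ c.val.toNat = 49 ∨ c.val.toNat = 50 ∨ c.val.toNat = 51 ∨
      c.val.toNat = 52 ∨ c.val.toNat = 53 ∨ c.val.toNat = 54 ∨ c.val.toNat = 55 ∨
      c.val.toNat = 56 ∨ c.val.toNat = 57 := by omega
  rcases h10 with h | h | h | h | h | h | h | h | h | h
  · simp [hc '0' (by rw [h]; decide)]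
  · simp [hc '1' (by rw [h]; decide)]
  · simp [hc '2' (by rw [h]; decide)]
  · simp [hc '3' (by rw [h]; decide)]
  · simp [hc '4' (by rw [h]; decide)]
  · simp [hc '5' (by rw [h]; decide)]
  · simp [hc '6' (by rw [h]; decide)]
  · simp [hc '7' (by rw [h]; decide)]
  · simp [hc '8' (by rw [h]; decide)]
  · simp [hc '9' (by rw [h]; decide)]

lemma pvAlt_not_twoDigits (d : String) (h : pvTwoDigits d.toList = false) :
    obter_grupo_dezena_alt d = ("Desconhecido", "Desconhecido") := by
  unfold obter_grupo_dezena_alt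
  split
  · next c1 c2 heq =>
      rw [heq] at h
      simp only [pvTwoDigits, Bool.and_eq_false_iff, decide_eq_false_iff_not] at h
      rw [if_neg]
      intro ⟨⟨a, b⟩, ⟨e, f⟩⟩
      rcases h with (h | h) | (h | h) <;> exact h (by assumption)
  · rfl

lemma pvAgree_twoDigits (c1 c2 : Char)
    (h1 : '0' ≤ c1) (h1' : c1 ≤ '9') (h2 : '0' ≤ c2) (h2' : c2 ≤ '9') :
    obter_grupo_dezena (String.ofList [c1, c2]) = obter_grupo_dezena_alt (String.ofList [c1, c2]) := by
  have m1 := pvDigit_mem c1 h1 h1'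
  have m2 := pvDigit_mem c2 h2 h2'
  fin_cases m1 <;> fin_cases m2 <;> decide

-- ===== VERDICT (by name: the statement is the Claim_ definition above) =====
theorem obter_grupo_dezena_spec : Claim_equal_obter_grupo_dezena := by
  intro d _
  unfold Spec_obter_grupo_dezena
  by_cases h : pvTwoDigits d.toList = true
  · match hl : d.toList with
    | [c1, c2] =>
        rw [hl] at h
        simp only [pvTwoDigits, Bool.and_eq_true, decide_eq_true_eq] at h
        obtain ⟨⟨h1, h1'⟩, ⟨h2, h2'⟩⟩ := h
        have hd : d = String.ofList [c1, c2] := by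
          rw [← hl]; exact String.ofList_toList.symm
        rw [hd]
        exact pvAgree_twoDigits c1 c2 h1 h1' h2 h2'
    | [] => rw [hl] at h; simp [pvTwoDigits] at h
    | [c] => rw [hl] at h; simp [pvTwoDigits] at h
    | c1 :: c2 :: c3 :: rest => rw [hl] at h; simp [pvTwoDigits] at h
  · rw [Bool.not_eq_true] at h
    have hA := pvScanA_not_twoDigits pvTabela d pvTabela_strings_twoDigits h
    show obter_grupo_dezena d = obter_grupo_dezena_alt d
    rw [show obter_grupo_dezena d = pvScanA pvTabela d from rfl, hA,
        pvAlt_not_twoDigits d h]
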